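-- pv_equiv track=rewrite | github.com/intro-prog-unisabana/lab6-sararinconch | overall.py | assignment_averages
-- ===== SOURCE A (Python) =====
-- def assignment_averages(students):
--     promedio_averages = {}
--     for assignments in students.values():
--         for assignment in assignments.keys():
--             suma_prom = 0
--             for student in students.values():
--                 suma_prom += student[assignment]
--             promedio_a = round(suma_prom/len(students))
--             promedio_averages[assignment] = promedio_a
--         break
--     return promedio_averages
-- ===== SOURCE B (Python) =====
-- def assignment_averages(students):
--     n = len(students)
--     values = iter(students.values())
--     first = next(values, None)
--     if first is None:
--         return {}
--     sums = dict(first)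
--     for student in values:
--         for assignment in sums:
--             sums[assignment] += student[assignment]
--     return {assignment: round(total / n) for assignment, total in sums.items()}
-- ===== Notes on version B (the rewrite author's own statement) =====
-- stated objective: simpler
-- what changed: B copies the first student's dict as running sums and folds each remaining student into it in one accumulation pass, instead of A's nested per-assignment rescan of all students.
import Mathlib
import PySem

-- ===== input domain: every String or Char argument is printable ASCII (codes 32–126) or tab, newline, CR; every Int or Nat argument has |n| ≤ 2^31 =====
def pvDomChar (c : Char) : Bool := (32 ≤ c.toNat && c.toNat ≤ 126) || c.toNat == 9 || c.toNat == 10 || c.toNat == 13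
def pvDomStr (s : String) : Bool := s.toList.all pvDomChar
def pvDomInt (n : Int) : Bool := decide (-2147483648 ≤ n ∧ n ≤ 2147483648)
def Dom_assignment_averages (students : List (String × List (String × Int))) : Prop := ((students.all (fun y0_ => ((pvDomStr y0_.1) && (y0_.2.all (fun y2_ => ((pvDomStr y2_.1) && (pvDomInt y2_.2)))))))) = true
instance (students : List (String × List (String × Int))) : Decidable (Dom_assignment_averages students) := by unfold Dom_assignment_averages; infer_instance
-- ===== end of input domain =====

-- B replaces A's per-assignment rescans of all students by: copy the first student's dict as the
-- running sums, add each remaining student into it in one pass, then round each total (simpler).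

-- shared: Python's round(a/n) for integer a and n > 0 — round-half-even of the exact rational a/n
-- (exact for the magnitudes Dom admits, where float division cannot cross a .5 boundary)
def pyRoundDiv (a n : Int) : Int :=
  let q := PySem.Int.floordiv a n
  let r := PySem.Int.mod a n
  if 2 * r < n then q
  else if n < 2 * r then q + 1
  else if PySem.Int.mod q 2 = 0 then q else q + 1

-- the dict-of-dicts the Python function receives, built from the assoc-list input
def pvStudentDicts (students : List (String × List (String × Int))) :
    List (PySem.Dict String Int) :=
  (PySem.Dict.ofList (students.map (fun p => (p.1, PySem.Dict.ofList p.2)))).values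

-- ===== PORT A =====
-- student[assignment] is ported as (st.get? k).getD 0; Pre_ excludes the KeyError inputs
def assignment_averages (students : List (String × List (String × Int))) : List (String × Int) :=
  let svals := pvStudentDicts students
  match svals with
  | [] => []
  | first :: _ =>
    (first.keys.foldl (fun d k =>
        let suma_prom := svals.foldl (fun acc st => acc + (st.get? k).getD 0) 0
        d.insert k (pyRoundDiv suma_prom (svals.length : Int)))
      PySem.Dict.empty).items

-- ===== PORT B =====
-- sums starts as a copy of the first student's dict; each later student is added into it in place
def assignment_averages_alt (students : List (String × List (String × Int))) : List (String × Int) :=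
  let svals := pvStudentDicts students
  let n : Int := (svals.length : Int)
  match svals with
  | [] => []
  | first :: rest =>
    let sums := rest.foldl
      (fun sums st =>
        sums.keys.foldl (fun s a => s.modify a 0 (fun v => v + (st.get? a).getD 0)) sums)
      first
    sums.items.map (fun p => (p.1, pyRoundDiv p.2 n))

-- ===== PRECONDITION & SPEC =====
-- Pre_ excludes exactly the inputs where Python A raises KeyError: some assignment key of the
-- first student is missing from another student's dict.
def Pre_assignment_averages (students : List (String × List (String × Int))) : Prop :=
  ∀ f ∈ (pvStudentDicts students).take 1, ∀ k ∈ f.keys,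
    ∀ d ∈ pvStudentDicts students, d.contains k = true
instance (students : List (String × List (String × Int))) : Decidable (Pre_assignment_averages students) := by unfold Pre_assignment_averages; infer_instance

def pvWitness_assignment_averages : (List (String × List (String × Int))) :=
  [("ana", [("hw1", 3), ("hw2", 4)]), ("bob", [("hw1", 5), ("hw2", 0)])]

def Spec_assignment_averages (students : List (String × List (String × Int))) (out : List (String × Int)) : Prop := out = assignment_averages_alt students
instance (students : List (String × List (String × Int))) (out : List (String × Int)) : Decidable (Spec_assignment_averages students out) := by unfold Spec_assignment_averages; infer_instance

-- ===== CLAIM (what is proved, stated in full; the proofs are below) =====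
def Claim_equal_assignment_averages : Prop := ∀ (students : List (String × List (String × Int))), Dom_assignment_averages students → Pre_assignment_averages students → Spec_assignment_averages students (assignment_averages students)

-- ===== LEMMAS AND PROOFS =====

-- one inner pass of B: adding g a at each key a of a distinct list shifts exactly those entries
theorem step_getD (ks : List String) (hk : ks.Nodup) (g : String → Int)
    (d : PySem.Dict String Int) (k : String) :
    (ks.foldl (fun s a => s.modify a 0 (fun v => v + g a)) d).getD k 0
      = d.getD k 0 + (if k ∈ ks then g k else 0) := by
  induction ks generalizing d with
  | nil => simp
  | cons a ks ih =>
    simp only [List.foldl_cons]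
    rw [ih (by simpa using hk.of_cons)]
    rw [PySem.Dict.getD_modify]
    rcases eq_or_ne k a with rfl | hne
    · have : k ∉ ks := by simpa using (List.nodup_cons.mp hk).1
      simp [this]
    · simp [List.mem_cons, hne]

-- the inner pass touches only keys already present, so the key list is unchanged
theorem step_keys (ks : List String) (d : PySem.Dict String Int)
    (hc : ∀ a ∈ ks, d.contains a = true) (g : String → Int) :
    (ks.foldl (fun s a => s.modify a 0 (fun v => v + g a)) d).keys = d.keys := by
  induction ks generalizing d with
  | nil => rfl
  | cons a ks ih =>
    simp only [List.foldl_cons]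
    have hca : d.contains a = true := hc a (by simp)
    have hkeys : (d.modify a 0 (fun v => v + g a)).keys = d.keys := by
      rw [PySem.Dict.keys_modify, PySem.Dict.keys_insert_of_contains _ _ hca]
    rw [ih _ (by intro b hb
                 rw [PySem.Dict.contains_modify]
                 simp [hc b (by simp [hb])]),
        hkeys]

-- B's outer loop: keys stay those of the first student and each total accumulates its column
theorem loop_spec (rest : List (PySem.Dict String Int)) (d : PySem.Dict String Int)
    (hnd : d.keys.Nodup) :
    (rest.foldl (fun sums st =>
        sums.keys.foldl (fun s a => s.modify a 0 (fun v => v + (st.get? a).getD 0)) sums) d).keys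
      = d.keys ∧
    ∀ k ∈ d.keys,
      (rest.foldl (fun sums st =>
          sums.keys.foldl (fun s a => s.modify a 0 (fun v => v + (st.get? a).getD 0)) sums) d).getD k 0
        = d.getD k 0 + (rest.map (fun st => (st.get? k).getD 0)).sum := by
  induction rest generalizing d with
  | nil => exact ⟨rfl, by simp⟩
  | cons st rest ih =>
    simp only [List.foldl_cons]
    have hkeys : (d.keys.foldl (fun s a => s.modify a 0 (fun v => v + (st.get? a).getD 0)) d).keys
        = d.keys :=
      step_keys d.keys d (fun a ha => (PySem.Dict.contains_iff_mem_keys d a).mpr ha) _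
    obtain ⟨ih1, ih2⟩ := ih _ (hkeys ▸ hnd)
    refine ⟨by rw [ih1, hkeys], ?_⟩
    intro k hk
    rw [ih2 k (by rw [hkeys]; exact hk), step_getD d.keys hnd _ d k]
    simp [hk]; ring

-- every value of a dict built by an insert loop comes from the start dict or the list
theorem mem_values_foldl_insert {κ ν : Type} [BEq κ] [LawfulBEq κ]
    (l : List (κ × ν)) (d : PySem.Dict κ ν) (w : ν)
    (h : w ∈ (l.foldl (fun d p => d.insert p.1 p.2) d).values) :
    w ∈ d.values ∨ ∃ p ∈ l, w = p.2 := by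
  induction l generalizing d with
  | nil => exact Or.inl h
  | cons p rest ih =>
    rcases ih (d.insert p.1 p.2) h with h' | h'
    · rcases PySem.Dict.mem_values_insert _ _ _ _ h' with h'' | h''
      · exact Or.inr ⟨p, by simp, h''⟩
      · exact Or.inl h''
    · rcases h' with ⟨q, hq, hw⟩
      exact Or.inr ⟨q, by simp [hq], hw⟩

-- every student dict the ports loop over has duplicate-free keys
theorem nodup_keys_studentDicts (students : List (String × List (String × Int)))
    (f : PySem.Dict String Int) (hf : f ∈ pvStudentDicts students) : f.keys.Nodup := by
  rcases mem_values_foldl_insert _ _ _ hf with h | ⟨p, hp, hw⟩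
  · simp [PySem.Dict.empty, PySem.Dict.values] at h
  · rcases List.mem_map.mp hp with ⟨q, _, rfl⟩
    subst hw
    exact PySem.Dict.nodup_keys_ofList _

theorem assignment_averages_spec : Claim_equal_assignment_averages := by
  intro students _ _
  unfold Spec_assignment_averages assignment_averages assignment_averages_alt
  cases h : pvStudentDicts students with
  | nil => simp
  | cons first rest =>
    simp only []
    have hnd : first.keys.Nodup :=
      nodup_keys_studentDicts students first (h ▸ List.mem_cons_self ..)
    obtain ⟨hK, hG⟩ := loop_spec rest first hnd
    -- A's side: fresh distinct inserts into an empty dict append in order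
    rw [PySem.Dict.items_foldl_insert_fresh first.keys (fun a => a)
      (fun k => pyRoundDiv ((first :: rest).foldl (fun acc st => acc + (st.get? k).getD 0) 0)
        (((first :: rest).length : Int)))
      PySem.Dict.empty (fun a _ => PySem.Dict.contains_empty a) (by simpa using hnd)]
    have hemp : (PySem.Dict.empty : PySem.Dict String Int).items = [] := rfl
    rw [hemp, List.nil_append]
    -- B's side: read the summed dict off as a map over the first student's keys
    conv_rhs => rw [PySem.Dict.items_eq_map_keys _ (by rw [hK]; exact hnd) (0 : Int)]
    rw [hK, List.map_map]
    refine List.map_congr_left ?_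
    intro k hk
    rw [Function.comp_apply, hG k hk, PySem.List.foldl_add, PySem.Dict.getD_eq_get?_getD]
    simp [add_comm]
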